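-- pv_equiv track=rewrite | github.com/deepakrana123/python_learning | DSA/DynamicProgramming/longestStringChain.py | isPredecessor
-- ===== SOURCE A (Python) =====
-- def isPredecessor(s, t):
--     # Function to check if s is a predecessor of t
--     if len(t) - len(s) != 1:
--         return False
--
--     i = 0
--     j = 0
--     while i < len(s) and j < len(t):
--         if s[i] == t[j]:
--             i += 1
--         j += 1
--
--     return i == len(s)
-- ===== SOURCE B (Python) =====
-- def isPredecessor(s, t):
--     if len(t) - len(s) != 1:
--         return False
--     return any(s == t[:i] + t[i + 1:] for i in range(len(t)))
-- ===== Notes on version B (the rewrite author's own statement) =====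
-- stated objective: simpler
-- what changed: Replaced the greedy two-pointer subsequence scan with a brute-force single-deletion check: try removing each character of t and compare the remainder to s.
import Mathlib
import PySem

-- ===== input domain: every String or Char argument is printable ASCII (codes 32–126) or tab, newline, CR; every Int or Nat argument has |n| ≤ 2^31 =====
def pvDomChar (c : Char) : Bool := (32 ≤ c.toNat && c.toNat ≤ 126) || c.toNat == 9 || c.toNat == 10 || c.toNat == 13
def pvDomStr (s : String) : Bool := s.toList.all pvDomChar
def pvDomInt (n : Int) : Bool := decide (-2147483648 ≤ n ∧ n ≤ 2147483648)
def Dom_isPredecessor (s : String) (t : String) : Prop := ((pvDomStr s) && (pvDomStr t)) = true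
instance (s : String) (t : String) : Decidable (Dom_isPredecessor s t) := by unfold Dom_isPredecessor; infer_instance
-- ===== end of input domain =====

-- B replaces A's greedy two-pointer subsequence scan by a brute-force single-deletion
-- check (try deleting each character of t and compare with s); simpler, not faster.

-- ===== PORT A =====
-- the while loop: j always advances, i advances on a match; returns the final i
def loopA (s t : List Char) (i j : Nat) : Nat :=
  if h : i < s.length ∧ j < t.length then
    if s[i]'h.1 = t[j]'h.2 then loopA s t (i + 1) (j + 1)
    else loopA s t i (j + 1)
  else i
termination_by t.length - j

def isPredecessor (s : String) (t : String) : Bool :=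
  if (t.toList.length : Int) - (s.toList.length : Int) ≠ 1 then false
  else decide (loopA s.toList t.toList 0 0 = s.toList.length)

-- ===== PORT B =====
def isPredecessor_alt (s : String) (t : String) : Bool :=
  if (t.toList.length : Int) - (s.toList.length : Int) ≠ 1 then false
  else (List.range t.toList.length).any
    (fun i => s.toList == t.toList.take i ++ t.toList.drop (i + 1))

-- ===== PRECONDITION & SPEC =====
def Spec_isPredecessor (s : String) (t : String) (out : Bool) : Prop := out = isPredecessor_alt s t
instance (s : String) (t : String) (out : Bool) : Decidable (Spec_isPredecessor s t out) := by unfold Spec_isPredecessor; infer_instance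

-- ===== CLAIM (what is proved, stated in full; the proofs are below) =====
def Claim_equal_isPredecessor : Prop := ∀ (s : String) (t : String), Dom_isPredecessor s t → Spec_isPredecessor s t (isPredecessor s t)

-- ===== LEMMAS AND PROOFS =====

-- proof-only model of A's loop: the standard greedy subsequence check
def subGreedy : List Char → List Char → Bool
  | [], _ => true
  | _ :: _, [] => false
  | a :: s, b :: t => if a = b then subGreedy s t else subGreedy (a :: s) t

theorem subGreedy_iff_sublist : ∀ (t s : List Char), subGreedy s t = true ↔ List.Sublist s t := by
  intro t
  induction t with
  | nil =>
    intro s; cases s <;> simp [subGreedy]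
  | cons b t ih =>
    intro s
    cases s with
    | nil => simp [subGreedy]
    | cons a s' =>
      by_cases hab : a = b
      · subst hab
        simp [subGreedy, ih, List.cons_sublist_cons]
      · simp only [subGreedy, if_neg hab, ih]
        constructor
        · intro h; exact h.cons b
        · intro h
          cases h with
          | cons _ h => exact h
          | cons₂ => exact absurd rfl hab

theorem loopA_iff (s t : List Char) :
    ∀ (j i : Nat), i ≤ s.length →
      ((loopA s t i j = s.length) ↔ subGreedy (s.drop i) (t.drop j) = true) := by
  intro j i
  fun_induction loopA s t i j with
  | case1 i j h heq ih =>
    intro hi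
    rw [List.drop_eq_getElem_cons h.1, List.drop_eq_getElem_cons h.2]
    simp only [subGreedy, if_pos heq]
    exact ih h.1
  | case2 i j h heq ih =>
    intro hi
    rw [List.drop_eq_getElem_cons h.1, List.drop_eq_getElem_cons h.2]
    simp only [subGreedy, if_neg heq]
    rw [← List.drop_eq_getElem_cons h.1]
    exact ih hi
  | case3 i j h =>
    intro hi
    rcases Nat.lt_or_ge i s.length with hlt | hge
    · have hj : t.length ≤ j := by omega
      rw [List.drop_eq_getElem_cons hlt, List.drop_eq_nil_of_le hj]
      simp [subGreedy]; omega
    · have : i = s.length := by omega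
      subst this
      simp [List.drop_eq_nil_of_le (le_refl s.length), subGreedy]

theorem sublist_del {s t : List Char} (h : List.Sublist s t) :
    s.length + 1 = t.length → ∃ i, i < t.length ∧ s = t.take i ++ t.drop (i + 1) := by
  induction h with
  | slnil => intro hl; simp at hl
  | cons a h ih =>
    intro hl
    have : _ = _ := h.eq_of_length (by have := h.length_le; simp at hl; omega)
    subst this
    exact ⟨0, by simp⟩
  | @cons₂ l₁ l₂ a h ih =>
    intro hl
    obtain ⟨i, hi, hEq⟩ := ih (by simp at hl; omega)
    exact ⟨i + 1, by simp; omega, by simp [hEq]⟩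

theorem del_sublist (t : List Char) (i : Nat) : List.Sublist (t.take i ++ t.drop (i + 1)) t := by
  have h1 : List.Sublist (t.drop (i + 1)) (t.drop i) := by
    have : t.drop (i + 1) = (t.drop i).tail := by
      rw [← List.drop_one, List.drop_drop]
    rw [this]; exact List.tail_sublist _
  have h2 : List.Sublist (t.take i ++ t.drop (i + 1)) (t.take i ++ t.drop i) := h1.append_left _
  rwa [List.take_append_drop] at h2

-- ===== VERDICT (by name: the statement is the Claim_ definition above) =====
theorem isPredecessor_spec : Claim_equal_isPredecessor := by
  intro s t _
  unfold Spec_isPredecessor isPredecessor isPredecessor_alt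
  split
  · rfl
  · next hg =>
    have hlen : t.toList.length = s.toList.length + 1 := by omega
    rw [Bool.eq_iff_iff]
    rw [decide_eq_true_iff, loopA_iff s.toList t.toList 0 0 (Nat.zero_le _)]
    simp only [List.drop_zero, subGreedy_iff_sublist, List.any_eq_true, List.mem_range,
      beq_iff_eq]
    constructor
    · intro h
      obtain ⟨i, hi, hEq⟩ := sublist_del h (by omega)
      exact ⟨i, hi, hEq⟩
    · rintro ⟨i, _, hEq⟩
      rw [hEq]; exact del_sublist _ _
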